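-- pv_equiv track=rewrite | github.com/zhenyatevo/UniversitiPython2022-2023 | Lab4/4_9_Цифровая сортировка.py | digitalSort
-- ===== SOURCE A (Python) =====
-- def digitalSort(arr):
--     max_digit = len(str(max(arr)))
--     res=[]
--     for i in range(max_digit):
--         buckets = [[] for _ in range(10)]
--         for num in arr:
--             digit = num // (10 ** i) % 10
--             buckets[digit].append(num)
--         arr = [num for bucket in buckets for num in bucket]
--         res.append(arr)
--     return list(res)
-- ===== SOURCE B (Python) =====
-- def digitalSort(arr):
--     def passes(a, i, k):
--         # remaining passes: digit positions i .. k-1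
--         if i == k:
--             return []
--         a = sorted(a, key=lambda n: n // 10 ** i % 10)  # stable sort by i-th digit
--         return [a] + passes(a, i + 1, k)
--     return passes(arr, 0, len(str(max(arr))))
-- ===== Notes on version B (the rewrite author's own statement) =====
-- stated objective: alternative
-- what changed: Each radix pass becomes one stable library sort keyed by the i-th digit (comparison sort) instead of distributing into ten mutable bucket lists and flattening, and the pass loop becomes a recursion that conses the snapshots; equal because flattening the buckets in digit order is exactly a stable sort by that digit.
import Mathlib
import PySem

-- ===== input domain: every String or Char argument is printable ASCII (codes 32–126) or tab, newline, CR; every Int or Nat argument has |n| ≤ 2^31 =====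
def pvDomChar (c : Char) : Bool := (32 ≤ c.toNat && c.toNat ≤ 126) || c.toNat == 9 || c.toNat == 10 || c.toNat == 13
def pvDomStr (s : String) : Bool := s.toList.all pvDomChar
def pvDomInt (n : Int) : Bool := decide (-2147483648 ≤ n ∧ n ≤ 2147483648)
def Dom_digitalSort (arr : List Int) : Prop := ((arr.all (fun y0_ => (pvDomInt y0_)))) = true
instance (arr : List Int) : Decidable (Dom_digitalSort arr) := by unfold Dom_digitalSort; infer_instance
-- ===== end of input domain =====

-- B replaces each bucket-distribution pass by one stable sort keyed by the i-th digit
-- and the pass loop by a recursion over the remaining digit positions; same return value.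

-- digit = num // (10 ** i) % 10   (shared by both Pythons, exact Python floor semantics)
def pyDigit (i : Nat) (num : Int) : Int :=
  PySem.Int.mod (PySem.Int.floordiv num ((10 : Int) ^ i)) 10

-- ===== PORT A =====
-- one radix pass of A: distribute arr into 10 buckets by digit (stable appends), then flatten
def digitalSortPassA (i : Nat) (a : List Int) : List Int :=
  let buckets : List (List Int) := (PySem.List.pyRange 0 10 1).map (fun _ => ([] : List Int))
  -- buckets[digit].append(num); digit is provably in 0..9 so .toNat is exact
  let buckets := a.foldl (fun bs num => bs.modify (pyDigit i num).toNat (fun b => b ++ [num])) buckets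
  buckets.flatten  -- [num for bucket in buckets for num in bucket]

def digitalSort (arr : List Int) : List (List Int) :=
  match PySem.List.max? arr (fun x => x) with
  | none => []  -- max([]) raises ValueError in Python; excluded by Pre_
  | some m =>
    let maxDigit := (PySem.Int.toStr m).toList.length  -- len(str(max(arr)))
    let st := (List.range maxDigit).foldl (fun (st : List Int × List (List Int)) i =>
      let a := digitalSortPassA i st.1
      (a, st.2 ++ [a])) (arr, [])
    st.2

-- ===== PORT B =====
-- passes(a, i, k): snapshots for digit positions i .. k-1; recursion on the count k - i
def digitalSortPasses (a : List Int) (i : Nat) : Nat → List (List Int)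
  | 0 => []
  | remaining + 1 =>
    let a' := PySem.List.sorted a (fun n => pyDigit i n)  -- sorted(a, key=digit) — stable
    a' :: digitalSortPasses a' (i + 1) remaining

def digitalSort_alt (arr : List Int) : List (List Int) :=
  match PySem.List.max? arr (fun x => x) with
  | none => []  -- max([]) raises ValueError in Python; excluded by Pre_
  | some m =>
    digitalSortPasses arr 0 (PySem.Int.toStr m).toList.length  -- len(str(max(arr)))

-- ===== PRECONDITION & SPEC =====
-- Pre_ excludes only the empty list, where Python's max(arr) raises ValueError.
def Pre_digitalSort (arr : List Int) : Prop := arr ≠ []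
instance (arr : List Int) : Decidable (Pre_digitalSort arr) := by unfold Pre_digitalSort; infer_instance
def pvWitness_digitalSort : List Int := ([170, 45, 75, -90, 802, 24, 2, 66])

def Spec_digitalSort (arr : List Int) (out : List (List Int)) : Prop := out = digitalSort_alt arr
instance (arr : List Int) (out : List (List Int)) : Decidable (Spec_digitalSort arr out) := by unfold Spec_digitalSort; infer_instance

-- ===== CLAIM (what is proved, stated in full; the proofs are below) =====
def Claim_equal_digitalSort : Prop := ∀ (arr : List Int), Dom_digitalSort arr → Pre_digitalSort arr → Spec_digitalSort arr (digitalSort arr)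

-- ===== LEMMAS AND PROOFS =====

theorem pyDigit_nonneg (i : Nat) (n : Int) : 0 ≤ pyDigit i n :=
  PySem.Int.mod_nonneg _ (by norm_num)

theorem pyDigit_lt (i : Nat) (n : Int) : pyDigit i n < 10 :=
  PySem.Int.mod_lt _ (by norm_num)

-- filling the buckets preserves their number
theorem pvFill_length (i : Nat) (a : List Int) (bs : List (List Int)) :
    (a.foldl (fun bs num => bs.modify (pyDigit i num).toNat (fun b => b ++ [num])) bs).length
      = bs.length := by
  induction a generalizing bs with
  | nil => rfl
  | cons n t ih => simp [List.foldl_cons, ih, List.length_modify]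

-- after filling, bucket j holds its old contents ++ the stable filter of digit j
theorem pvFill_getElem (i : Nat) (a : List Int) (j : Nat) :
    ∀ (bs : List (List Int)) (hj : j < bs.length),
    (a.foldl (fun bs num => bs.modify (pyDigit i num).toNat (fun b => b ++ [num])) bs)[j]'(by rw [pvFill_length]; exact hj)
      = bs[j] ++ a.filter (fun n => (pyDigit i n).toNat == j) := by
  induction a with
  | nil => intro bs hj; simp
  | cons n t ih =>
    intro bs hj
    simp only [List.foldl_cons, List.filter_cons]
    rw [ih (bs.modify (pyDigit i n).toNat (fun b => b ++ [n])) (by simpa using hj)]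
    rw [List.getElem_modify]
    by_cases h : (pyDigit i n).toNat = j
    · simp [h]
    · simp [h]

-- the filled buckets, elementwise: bucket j is the filter of digit j
theorem pvFill_eq_map (i : Nat) (a : List Int) (L : Nat) :
    a.foldl (fun bs num => bs.modify (pyDigit i num).toNat (fun b => b ++ [num]))
        ((List.range L).map (fun _ => ([] : List Int)))
      = (List.range L).map (fun j => a.filter (fun n => (pyDigit i n).toNat == j)) := by
  apply List.ext_getElem
  · rw [pvFill_length]; simp
  · intro j h1 h2
    rw [pvFill_getElem i a j _ (by simpa [pvFill_length] using h1)]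
    simp

-- digit-as-Nat filter equals digit-as-Int filter (the digit is nonnegative)
theorem pvFilter_cast (i : Nat) (a : List Int) (k : Nat) :
    a.filter (fun n => (pyDigit i n).toNat == k) = a.filter (fun n => pyDigit i n == (k : Int)) := by
  apply List.filter_congr
  intro n _
  rcases Int.eq_ofNat_of_zero_le (pyDigit_nonneg i n) with ⟨m, hm⟩
  simp [hm]

-- insertBy passes over a prefix none of whose elements compare after x
theorem pvInsertBy_append (b : Int → Int → Bool) (x : Int) (ys zs : List Int)
    (h : ∀ y ∈ ys, b x y = false) :
    PySem.List.insertBy b x (ys ++ zs) = ys ++ PySem.List.insertBy b x zs := by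
  induction ys with
  | nil => rfl
  | cons y t ih =>
    simp only [List.cons_append, PySem.List.insertBy, h y (by simp)]
    simp [ih (fun y hy => h y (by simp [hy]))]

-- insertBy puts x in front when every element compares after it
theorem pvInsertBy_front (b : Int → Int → Bool) (x : Int) (zs : List Int)
    (h : ∀ z ∈ zs, b x z = true) :
    PySem.List.insertBy b x zs = x :: zs := by
  cases zs with
  | nil => rfl
  | cons z t => simp [PySem.List.insertBy, h z (by simp)]

-- inserting x into digit-grouped a puts it at the end of its digit group (stability)
theorem pvInsert_grouped (key : Int → Int) (x : Int) (ds : List Int) (a : List Int)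
    (hmem : key x ∈ ds) (hsorted : ds.Pairwise (· < ·)) :
    PySem.List.insertBy (fun p q => decide (key p < key q)) x
        (ds.flatMap (fun d => a.filter (fun n => key n == d)))
      = ds.flatMap (fun d => (a ++ [x]).filter (fun n => key n == d)) := by
  induction ds with
  | nil => simp at hmem
  | cons d ds ih =>
    have hds : ∀ d' ∈ ds, d < d' := by
      intro d' hd'; exact (List.pairwise_cons.mp hsorted).1 d' hd'
    simp only [List.flatMap_cons]
    rw [pvInsertBy_append _ _ _ _ (by
      intro y hy
      have : key y = d := by simpa using (List.mem_filter.mp hy).2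
      simp [this]
      by_cases hxd : key x = d
      · omega
      · have hx : key x ∈ ds := (List.mem_cons.mp hmem).resolve_left hxd
        have := hds _ hx; omega)]
    by_cases hxd : key x = d
    · -- x joins group d: goes in front of all later groups (strictly larger digits)
      rw [pvInsertBy_front _ _ _ (by
        intro z hz
        rcases List.mem_flatMap.mp hz with ⟨d', hd', hz'⟩
        have : key z = d' := by simpa using (List.mem_filter.mp hz').2
        have := hds _ hd'
        simp [hxd]; omega)]
      have h1 : (a ++ [x]).filter (fun n => key n == d) = a.filter (fun n => key n == d) ++ [x] := by
        simp [List.filter_append, hxd]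
      have h2 : ds.flatMap (fun d' => (a ++ [x]).filter (fun n => key n == d'))
          = ds.flatMap (fun d' => a.filter (fun n => key n == d')) := by
        apply List.flatMap_congr
        intro d' hd'
        have hne : key x ≠ d' := by have := hds _ hd'; omega
        simp [List.filter_append, hne]
      rw [h1, h2]; simp
    · -- x belongs to a strictly later group
      have hx : key x ∈ ds := (List.mem_cons.mp hmem).resolve_left hxd
      rw [ih hx (List.pairwise_cons.mp hsorted).2]
      have : (a ++ [x]).filter (fun n => key n == d) = a.filter (fun n => key n == d) := by
        simp [List.filter_append, hxd]
      rw [this]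

-- a stable sort by the i-th digit is the concatenation of the digit filters 0..9
theorem pvSorted_eq_flatMap (i : Nat) (a : List Int) :
    PySem.List.sorted a (fun n => pyDigit i n)
      = ((List.range 10).map (Int.ofNat)).flatMap
          (fun d => a.filter (fun n => pyDigit i n == d)) := by
  induction a using List.reverseRecOn with
  | nil => simp [PySem.List.sorted_eq_foldl_insertBy]
  | append_singleton a x ih =>
    rw [PySem.List.sorted_eq_foldl_insertBy] at *
    rw [List.foldl_append, List.foldl_cons, List.foldl_nil, ih]
    apply pvInsert_grouped
    · have h0 := pyDigit_nonneg i x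
      have h10 := pyDigit_lt i x
      rcases Int.eq_ofNat_of_zero_le h0 with ⟨m, hm⟩
      simp only [List.mem_map, List.mem_range]
      exact ⟨m, by omega, hm.symm⟩
    · rw [List.pairwise_map]
      exact (List.pairwise_lt_range).imp (fun h => Int.ofNat_lt.mpr h)

-- one pass of A equals one pass of B
theorem pvPass_eq (i : Nat) (a : List Int) :
    digitalSortPassA i a = PySem.List.sorted a (fun n => pyDigit i n) := by
  unfold digitalSortPassA
  rw [PySem.List.pyRange_one]
  simp only [List.map_map, Function.comp_def, zero_add]
  rw [show ((10 : Int) - 0).toNat = 10 from rfl]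
  rw [pvFill_eq_map i a 10, pvSorted_eq_flatMap]
  rw [List.flatten_eq_flatMap, List.flatMap_map, List.flatMap_map]
  apply List.flatMap_congr
  intro j _
  exact pvFilter_cast i a j

-- A's snapshot fold over range' i k equals B's recursion on the remaining pass count
theorem pvLoop_eq (k : Nat) : ∀ (i : Nat) (a : List Int) (acc : List (List Int)),
    ((List.range' i k).foldl (fun (st : List Int × List (List Int)) j =>
        let a := digitalSortPassA j st.1
        (a, st.2 ++ [a])) (a, acc)).2
      = acc ++ digitalSortPasses a i k := by
  induction k with
  | zero => intro i a acc; simp [digitalSortPasses]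
  | succ k ih =>
    intro i a acc
    rw [List.range'_succ, List.foldl_cons]
    simp only [digitalSortPasses, ← pvPass_eq]
    rw [ih (i + 1) (digitalSortPassA i a) (acc ++ [digitalSortPassA i a])]
    simp

-- ===== VERDICT (by name: the statement is the Claim_ definition above) =====
theorem digitalSort_spec : Claim_equal_digitalSort := by
  intro arr _ _
  unfold Spec_digitalSort digitalSort digitalSort_alt
  cases PySem.List.max? arr (fun x => x) with
  | none => rfl
  | some m =>
    simp only [List.range_eq_range']
    simpa using pvLoop_eq (PySem.Int.toStr m).toList.length 0 arr []
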